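-- pv_equiv track=rewrite | github.com/haru-44/prime_text | src/b_smooth_sieve.py | b_smooth_sieve
-- ===== SOURCE A (Python) =====
-- from typing import List
--
-- def b_smooth_sieve(n: int, B: int) -> List[int]:
--     """ B-smoothな数を篩う
--
--     Args:
--         n (int): nまでのリストを作成する
--         B (int): B-smooth
--
--     Returns:
--         sieve_list (list[int]): nが素数     <=> sieve_list[n] == 1
--                                 nはB-smooth <=> sieve_list[n] == n
--     Examples:
--         >>> sieve_list = b_smooth_sieve(100, 5)
--         >>> sieve_list[20] # 20 = 2**2 * 5 は、5-smoothなので出力は20と一致する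
--         20
--         >>> sieve_list[14] # 14 = 2 * 7 は5-smoothではないから出力は14と一致しない
--         2
--         """
--     sieve_list = [1] * (n + 1)
--     for p in range(2, B + 1):
--         if sieve_list[p] == 1:
--             q = p
--             while q < n + 1:
--                 for idx in range(q, n + 1, q):
--                     sieve_list[idx] *= p
--                 q *= p
--     return sieve_list
-- ===== SOURCE B (Python) =====
-- def b_smooth_sieve(n, B):
--     def p_part(p, m):
--         # largest power of p dividing m (1 for m == 0 or p not dividing m)
--         r = 1
--         while m > 0 and m % p == 0:
--             r *= p
--             m //= p
--         return r
--     sieve_list = [1] * (n + 1)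
--     for p in range(2, B + 1):
--         if sieve_list[p] == 1:
--             for idx in range(p, n + 1, p):
--                 sieve_list[idx] *= p_part(p, idx)
--     return sieve_list
-- ===== Notes on version B (the rewrite author's own statement) =====
-- stated objective: alternative
-- what changed: Each prime phase makes a single pass over the multiples of p, multiplying each entry by its full p-power part computed by repeated division, instead of A's separate marking pass over the multiples of every prime power q = p, p^2, p^3, ...
import Mathlib
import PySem

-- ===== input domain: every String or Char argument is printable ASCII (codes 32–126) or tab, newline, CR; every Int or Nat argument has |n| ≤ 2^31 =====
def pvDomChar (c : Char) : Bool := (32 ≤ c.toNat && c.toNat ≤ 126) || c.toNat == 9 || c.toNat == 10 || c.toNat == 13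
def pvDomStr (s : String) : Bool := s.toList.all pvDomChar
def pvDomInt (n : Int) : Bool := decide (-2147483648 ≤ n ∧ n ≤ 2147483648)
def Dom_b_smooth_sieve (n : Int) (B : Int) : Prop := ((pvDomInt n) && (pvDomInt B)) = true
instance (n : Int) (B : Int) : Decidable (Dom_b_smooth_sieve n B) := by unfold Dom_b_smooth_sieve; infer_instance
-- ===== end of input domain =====

-- B rebuilds the list once per prime phase, computing each entry's p-power part by repeated
-- division, instead of A's in-place marking of the multiples of every prime power
-- (objective: alternative decomposition; not claimed faster).

-- ===== PORT A =====

-- sieve_list[idx] *= p  (pySetD/pyGetD: total forms; idx is in range whenever Python reaches it)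
def aMark (p : Int) (l : List Int) (idx : Int) : List Int :=
  PySem.List.pySetD l idx (PySem.List.pyGetD l idx 0 * p)

-- q = p; while q < n + 1: (for idx in range(q, n+1, q): sieve_list[idx] *= p); q *= p
-- The conjuncts 2 ≤ p and 1 ≤ q only make the recursion total; they hold at every call site
-- (p comes from range(2, B+1) and q starts at p).  The Python loop condition is q < n + 1.
def aWhile (n p : Int) (l : List Int) (q : Int) : List Int :=
  if h : 2 ≤ p ∧ 1 ≤ q ∧ q < n + 1 then
    aWhile n p ((PySem.List.pyRange q (n + 1) q).foldl (aMark p) l) (q * p)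
  else l
termination_by (n + 1 - q).toNat
decreasing_by
  have hq : q + 1 ≤ q * p := by nlinarith [h.1, h.2.1]
  omega

def b_smooth_sieve (n : Int) (B : Int) : List Int :=
  (PySem.List.pyRange 2 (B + 1) 1).foldl
    (fun l p => if PySem.List.pyGet? l p = some 1 then aWhile n p l p else l)
    (List.replicate (n + 1).toNat 1)

-- ===== PORT B =====

-- r = 1; while m > 0 and m % p == 0: r *= p; m //= p; return r
-- The conjunct 2 ≤ p only makes the recursion total; every call site passes p from range(2, B+1).
def pPartAux (p m r : Int) : Int :=
  if h : 2 ≤ p ∧ 0 < m ∧ PySem.Int.mod m p = 0 then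
    pPartAux p (PySem.Int.floordiv m p) (r * p)
  else r
termination_by m.toNat
decreasing_by
  have h2 : PySem.Int.floordiv m p = m / p := PySem.Int.floordiv_eq_ediv_of_pos (by omega)
  have h3 : m / p < m := by
    rw [Int.ediv_lt_iff_lt_mul (by omega : (0:Int) < p)]
    nlinarith [h.1, h.2.1]
  have h4 : 0 ≤ m / p := Int.ediv_nonneg (by omega) (by omega)
  omega

def pPart (p m : Int) : Int := pPartAux p m 1

-- sieve_list[idx] *= p_part(p, idx)
def bMark (p : Int) (l : List Int) (idx : Int) : List Int :=
  PySem.List.pySetD l idx (PySem.List.pyGetD l idx 0 * pPart p idx)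

def b_smooth_sieve_alt (n : Int) (B : Int) : List Int :=
  (PySem.List.pyRange 2 (B + 1) 1).foldl
    (fun l p => if PySem.List.pyGet? l p = some 1
      then (PySem.List.pyRange p (n + 1) p).foldl (bMark p) l else l)
    (List.replicate (n + 1).toNat 1)

-- ===== PRECONDITION & SPEC =====
-- Pre_ excludes exactly the inputs on which the Python A raises IndexError (some p in
-- range(2, B+1) exceeds the last index n of sieve_list); my Python B raises on the same inputs.
def Pre_b_smooth_sieve (n : Int) (B : Int) : Prop := B ≤ 1 ∨ B ≤ n
instance (n : Int) (B : Int) : Decidable (Pre_b_smooth_sieve n B) := by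
  unfold Pre_b_smooth_sieve; infer_instance

def pvWitness_b_smooth_sieve : Int × Int := (20, 5)

def Spec_b_smooth_sieve (n : Int) (B : Int) (out : List Int) : Prop := out = b_smooth_sieve_alt n B
instance (n : Int) (B : Int) (out : List Int) : Decidable (Spec_b_smooth_sieve n B out) := by
  unfold Spec_b_smooth_sieve; infer_instance

-- ===== CLAIM (what is proved, stated in full; the proofs are below) =====
def Claim_equal_b_smooth_sieve : Prop := ∀ (n : Int) (B : Int), Dom_b_smooth_sieve n B →
  Pre_b_smooth_sieve n B → Spec_b_smooth_sieve n B (b_smooth_sieve n B)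

-- ===== LEMMAS AND PROOFS =====

-- per-index multiplier contributed by A's while-loop over the prime powers q, q·p, q·p², …
def roundsMul (n p q i : Int) : Int :=
  if h : 2 ≤ p ∧ 1 ≤ q ∧ q < n + 1 then
    (if q ∣ i ∧ i ≠ 0 then p else 1) * roundsMul n p (q * p) i
  else 1
termination_by (n + 1 - q).toNat
decreasing_by
  have hq : q + 1 ≤ q * p := by nlinarith [h.1, h.2.1]
  omega

theorem length_foldl_aMark (p : Int) (R : List Int) (l : List Int) :
    (R.foldl (aMark p) l).length = l.length := by
  induction R generalizing l with
  | nil => rfl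
  | cons x R ih => simp [List.foldl, ih, aMark, PySem.List.length_pySetD]

theorem length_aWhile (n p : Int) (l : List Int) (q : Int) :
    (aWhile n p l q).length = l.length := by
  fun_induction aWhile n p l q with
  | case1 l q h ih => rw [ih, length_foldl_aMark]
  | case2 => rfl

theorem aMark_getElem? (p x : Int) (hx1 : 1 ≤ x) (l : List Int) (j : Nat) (hj : j < l.length) :
    (aMark p l x)[j]? = some (if (j : Int) = x then l[j] * p else l[j]) := by
  by_cases hxr : x < (l.length : Int)
  · have hset : aMark p l x = l.set x.toNat (l[x.toNat]'(by omega) * p) := by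
      rw [aMark, PySem.List.pySetD_of_nonneg l _ (by omega),
        PySem.List.pyGetD_eq_getElem l 0 (by omega) (by exact_mod_cast hxr)]
    rw [hset]
    rcases eq_or_ne (j : Int) x with h | h
    · have : x.toNat = j := by omega
      subst this
      simp [h, hj]
    · have : x.toNat ≠ j := by omega
      simp [List.getElem?_set, this, h]
  · have hid : aMark p l x = l := by
      rw [aMark, PySem.List.pySetD]
      have : PySem.List.pySet? l x (PySem.List.pyGetD l x 0 * p) = none := by
        rw [PySem.List.pySet?_eq_none_iff, PySem.Raise.InRange]
        omega
      rw [this]; rfl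
    have : ¬ (j : Int) = x := by omega
    simp [hid, this, hj]

theorem getElem?_foldl_aMark (p : Int) (R : List Int) (hnd : R.Nodup)
    (hpos : ∀ x ∈ R, 1 ≤ x) (l : List Int) (i : Nat) (hi : i < l.length) :
    (R.foldl (aMark p) l)[i]? = some (if (i : Int) ∈ R then l[i] * p else l[i]) := by
  induction R generalizing l with
  | nil => simp [List.foldl, hi]
  | cons x R ih =>
    have hx1 : 1 ≤ x := hpos x (by simp)
    have hlen' : (aMark p l x).length = l.length := by
      simp [aMark, PySem.List.length_pySetD]
    have hi' : i < (aMark p l x).length := by omega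
    have step := aMark_getElem? p x hx1 l i hi
    have hval : (aMark p l x)[i]'hi' = if (i : Int) = x then l[i] * p else l[i] := by
      have := List.getElem?_eq_getElem hi'
      rw [this] at step
      exact Option.some.inj step
    have goal := ih hnd.of_cons (fun y hy => hpos y (by simp [hy])) (aMark p l x) (by omega)
    simp only [List.foldl]
    rw [goal, hval]
    rcases eq_or_ne ((i : Int)) x with h | h
    · have hxR : x ∉ R := (List.nodup_cons.1 hnd).1
      have hiR : ((i : Int)) ∉ R := by rw [h]; exact hxR
      rw [if_neg hiR, if_pos h, if_pos (by simp [h] : (i : Int) ∈ x :: R)]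
    · rw [if_neg h]
      by_cases hm : (i : Int) ∈ R
      · rw [if_pos hm, if_pos (by simp [hm] : (i : Int) ∈ x :: R)]
      · rw [if_neg hm, if_neg (by simp [h, hm] : ¬ (i : Int) ∈ x :: R)]

theorem nodup_pyRange_pos (a b s : Int) (hs : 0 < s) : (PySem.List.pyRange a b s).Nodup := by
  rw [PySem.List.pyRange_of_pos a b hs]
  refine List.Nodup.map ?_ (List.nodup_range)
  intro k1 k2 hk
  have h1 : s * (k1 : Int) = s * k2 := by
    have := add_left_cancel hk
    exact this
  have : (k1 : Int) = k2 := mul_left_cancel₀ (by omega) h1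
  exact_mod_cast this

theorem mem_round_iff (n q : Int) (hq : 1 ≤ q) (i : Nat) (hin : (i : Int) < n + 1) :
    ((i : Int) ∈ PySem.List.pyRange q (n + 1) q) ↔ (q ∣ (i : Int) ∧ (i : Int) ≠ 0) := by
  rw [PySem.List.mem_pyRange_iff_of_pos (by omega)]
  constructor
  · rintro ⟨h1, h2, h3⟩
    have hd : q ∣ (i : Int) := by
      have := dvd_add h3 (dvd_refl q)
      simpa using this
    exact ⟨hd, by omega⟩
  · rintro ⟨h1, h2⟩
    refine ⟨?_, hin, ?_⟩
    · exact Int.le_of_dvd (by omega) h1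
    · exact dvd_sub h1 dvd_rfl

theorem getElem?_aWhile (n p : Int) (l : List Int) (q : Int) (hp : 2 ≤ p) (hq : 1 ≤ q)
    (hlen : l.length ≤ (n + 1).toNat) (i : Nat) (hi : i < l.length) :
    (aWhile n p l q)[i]? = some (l[i] * roundsMul n p q (i : Int)) := by
  fun_induction aWhile n p l q with
  | case1 l q h ih =>
    have hlen' : ((PySem.List.pyRange q (n + 1) q).foldl (aMark p) l).length = l.length :=
      length_foldl_aMark p _ l
    have hstep := getElem?_foldl_aMark p (PySem.List.pyRange q (n + 1) q)
      (nodup_pyRange_pos q (n + 1) q (by omega))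
      (fun x hx => by
        have := (PySem.List.mem_pyRange_iff_of_pos (by omega : (0:Int) < q) x).1 hx
        omega) l i hi
    have hival : ((PySem.List.pyRange q (n + 1) q).foldl (aMark p) l)[i]'(by omega) =
        if (i : Int) ∈ PySem.List.pyRange q (n + 1) q then l[i] * p else l[i] := by
      rw [List.getElem?_eq_getElem (by omega : i < ((PySem.List.pyRange q (n + 1) q).foldl (aMark p) l).length)] at hstep
      exact Option.some.inj hstep
    have hqp : 1 ≤ q * p := by nlinarith [h.1, h.2.1]
    rw [ih hqp (by omega) (by omega), hival]
    simp only [mem_round_iff n q (by omega) i (by omega)]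
    conv_rhs => rw [roundsMul, dif_pos h]
    by_cases hc : q ∣ (i : Int) ∧ (i : Int) ≠ 0
    · rw [if_pos hc, if_pos hc]; ring
    · rw [if_neg hc, if_neg hc]; ring
  | case2 l q h =>
    rw [roundsMul, dif_neg h]
    simp [hi]

theorem roundsMul_zero (n p q : Int) : roundsMul n p q 0 = 1 := by
  fun_induction roundsMul n p q 0 with
  | case1 q h ih => simp only [if_neg (by simp : ¬ (q ∣ (0:Int) ∧ (0:Int) ≠ 0)), ih, one_mul]
  | case2 q h => rfl

theorem roundsMul_notdvd (n p q i : Int) (hpq : p ∣ q) (hnd : ¬ p ∣ i) :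
    roundsMul n p q i = 1 := by
  fun_induction roundsMul n p q i with
  | case1 q h ih =>
    have hq : ¬ (q ∣ i ∧ i ≠ 0) := by
      rintro ⟨hd, _⟩; exact hnd (dvd_trans hpq hd)
    rw [if_neg hq, ih (dvd_mul_of_dvd_left hpq p), one_mul]
  | case2 q h => rfl

theorem roundsMul_small (n p q i : Int) (hi : 1 ≤ i) (hiq : i < q) :
    roundsMul n p q i = 1 := by
  fun_induction roundsMul n p q i with
  | case1 q h ih =>
    have hq : ¬ (q ∣ i ∧ i ≠ 0) := by
      rintro ⟨hd, _⟩
      have := Int.le_of_dvd (by omega) hd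
      omega
    have hlt : i < q * p := by nlinarith [h.1, h.2.1]
    rw [if_neg hq, ih hlt, one_mul]
  | case2 q h => rfl

theorem roundsMul_bound_mono (p : Int) (hp : 2 ≤ p) (n n' q i : Int) (hq : 1 ≤ q)
    (hi : 1 ≤ i) (hin : i ≤ n') (hnn : n' ≤ n) :
    roundsMul n' p q i = roundsMul n p q i := by
  fun_induction roundsMul n p q i with
  | case1 q h ih =>
    by_cases hq' : q < n' + 1
    · rw [roundsMul, dif_pos ⟨hp, h.2.1, hq'⟩, ih (by nlinarith [h.2.1])]
    · have h1 : i < q := by omega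
      rw [roundsMul, dif_neg (fun hc => absurd hc.2.2 (by omega)),
        roundsMul_small n p (q * p) i hi (by nlinarith [h.1, h.2.1]),
        if_neg (fun hc => absurd (Int.le_of_dvd (by omega) hc.1) (by omega)), mul_one]
  | case2 q h =>
    rw [roundsMul, dif_neg (fun hc => absurd ⟨hc.1, hc.2.1, by omega⟩ h)]

theorem roundsMul_shift (p : Int) (hp : 2 ≤ p) (n q j : Int) (hq : 1 ≤ q) :
    roundsMul n p (q * p) (p * j) = roundsMul (PySem.Int.floordiv n p) p q j := by
  fun_induction roundsMul (PySem.Int.floordiv n p) p q j with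
  | case1 q h ih =>
    have hqn : q * p ≤ n := by
      have := (PySem.Int.le_floordiv_iff_mul_le (by omega : (0:Int) < p)).1 (by omega : q ≤ PySem.Int.floordiv n p)
      exact this
    conv_lhs => rw [roundsMul]
    rw [dif_pos ⟨hp, by nlinarith [h.2.1], by omega⟩]
    have hcond : (q * p ∣ p * j ∧ p * j ≠ 0) ↔ (q ∣ j ∧ j ≠ 0) := by
      constructor
      · rintro ⟨h1, h2⟩
        refine ⟨?_, fun hj => h2 (by rw [hj, mul_zero])⟩
        have : p * q ∣ p * j := by rwa [mul_comm q p] at h1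
        exact (mul_dvd_mul_iff_left (by omega : p ≠ 0)).1 this
      · rintro ⟨h1, h2⟩
        refine ⟨?_, mul_ne_zero (by omega) h2⟩
        rw [mul_comm q p]
        exact mul_dvd_mul_left p h1
    rw [if_congr hcond rfl rfl, ih (by nlinarith [h.2.1])]
  | case2 q h =>
    by_cases hpq : 2 ≤ p ∧ 1 ≤ q
    · have hqn : ¬ q * p ≤ n := by
        intro hc
        exact h ⟨hpq.1, hpq.2, by
          have := (PySem.Int.le_floordiv_iff_mul_le (by omega : (0:Int) < p)).2 hc
          omega⟩
      rw [roundsMul, dif_neg (fun hc => absurd hc.2.2 (by omega))]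
    · rw [roundsMul, dif_neg (fun hc => absurd ⟨hc.1, by nlinarith [hc.1, hc.2.1]⟩ hpq)]

theorem floordiv_toNat_lt (p m : Int) (h : 2 ≤ p ∧ 0 < m ∧ PySem.Int.mod m p = 0) :
    (PySem.Int.floordiv m p).toNat < m.toNat := by
  have h2 : PySem.Int.floordiv m p = m / p := PySem.Int.floordiv_eq_ediv_of_pos (by omega)
  have h3 : m / p < m := by
    rw [Int.ediv_lt_iff_lt_mul (by omega : (0:Int) < p)]
    nlinarith [h.1, h.2.1]
  have h4 : 0 ≤ m / p := Int.ediv_nonneg (by omega) (by omega)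
  omega

theorem pPartAux_mul (p : Int) : ∀ (k : Nat) (m : Int), m.toNat = k → ∀ r,
    pPartAux p m r = r * pPartAux p m 1 := by
  intro k
  induction k using Nat.strong_induction_on with
  | _ k ih =>
    intro m hk r
    by_cases h : 2 ≤ p ∧ 0 < m ∧ PySem.Int.mod m p = 0
    · rw [pPartAux, dif_pos h]
      conv_rhs => rw [pPartAux, dif_pos h]
      have hfd : (PySem.Int.floordiv m p).toNat < k := hk ▸ floordiv_toNat_lt p m h
      rw [ih _ hfd _ rfl (r * p), ih _ hfd _ rfl (1 * p)]
      ring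
    · rw [pPartAux, dif_neg h]
      conv_rhs => rw [pPartAux, dif_neg h]
      ring

theorem roundsMul_eq_pPart (p : Int) (hp : 2 ≤ p) : ∀ (k : Nat) (n i : Int), i.toNat = k →
    0 ≤ i → i ≤ n → roundsMul n p p i = pPart p i := by
  intro k
  induction k using Nat.strong_induction_on with
  | _ k ih =>
    intro n i hk h0 hin
    rcases eq_or_lt_of_le h0 with h1 | h1
    · rw [← h1, roundsMul_zero, pPart, pPartAux, dif_neg (fun hc => absurd hc.2.1 (by omega))]
    · by_cases hd : p ∣ i
      · obtain ⟨j, hj⟩ := hd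
        have hj1 : 1 ≤ j := by nlinarith
        have hji : j < i := by nlinarith
        have hpi : p ≤ i := Int.le_of_dvd (by omega) ⟨j, hj⟩
        have hpp : pPart p i = p * pPart p j := by
          rw [pPart, pPartAux,
            dif_pos ⟨hp, by omega, (PySem.Int.mod_eq_zero_iff_dvd i p).2 ⟨j, hj⟩⟩,
            PySem.Int.floordiv_eq_ediv_of_pos (by omega : (0:Int) < p), hj,
            Int.mul_ediv_cancel_left _ (by omega : p ≠ 0),
            pPartAux_mul p j.toNat j rfl (1 * p)]
          rw [pPart]; ring
        have hr : roundsMul n p p i = p * roundsMul n p (p * p) i := by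
          rw [roundsMul, dif_pos ⟨hp, by omega, by omega⟩, if_pos ⟨⟨j, hj⟩, by omega⟩]
        have hshift : roundsMul n p (p * p) i = roundsMul (PySem.Int.floordiv n p) p p j := by
          rw [hj]; exact roundsMul_shift p hp n p j (by omega)
        have hjfd : j ≤ PySem.Int.floordiv n p := by
          rw [PySem.Int.le_floordiv_iff_mul_le (by omega : (0:Int) < p)]
          nlinarith
        have hfdn : PySem.Int.floordiv n p ≤ n := by
          rw [PySem.Int.floordiv_eq_ediv_of_pos (by omega : (0:Int) < p)]
          exact Int.ediv_le_self p (by omega)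
        have hmono := roundsMul_bound_mono p hp n (PySem.Int.floordiv n p) p j
          (by omega) hj1 hjfd hfdn
        rw [hr, hshift, hmono, ih j.toNat (by omega) n j rfl (by omega) (by omega), hpp]
      · rw [roundsMul_notdvd n p p i dvd_rfl hd, pPart, pPartAux, dif_neg
          (fun hc => hd ((PySem.Int.mod_eq_zero_iff_dvd i p).1 hc.2.2))]

theorem bMark_getElem? (p x : Int) (hx1 : 1 ≤ x) (l : List Int) (j : Nat) (hj : j < l.length) :
    (bMark p l x)[j]? = some (if (j : Int) = x then l[j] * pPart p x else l[j]) := by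
  by_cases hxr : x < (l.length : Int)
  · have hset : bMark p l x = l.set x.toNat (l[x.toNat]'(by omega) * pPart p x) := by
      rw [bMark, PySem.List.pySetD_of_nonneg l _ (by omega),
        PySem.List.pyGetD_eq_getElem l 0 (by omega) (by exact_mod_cast hxr)]
    rw [hset]
    rcases eq_or_ne (j : Int) x with h | h
    · have : x.toNat = j := by omega
      subst this
      simp [h, hj]
    · have : x.toNat ≠ j := by omega
      simp [List.getElem?_set, this, h]
  · have hid : bMark p l x = l := by
      rw [bMark, PySem.List.pySetD]
      have : PySem.List.pySet? l x (PySem.List.pyGetD l x 0 * pPart p x) = none := by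
        rw [PySem.List.pySet?_eq_none_iff, PySem.Raise.InRange]
        omega
      rw [this]; rfl
    have : ¬ (j : Int) = x := by omega
    simp [hid, this, hj]

theorem length_foldl_bMark (p : Int) (R : List Int) (l : List Int) :
    (R.foldl (bMark p) l).length = l.length := by
  induction R generalizing l with
  | nil => rfl
  | cons x R ih => simp [List.foldl, ih, bMark, PySem.List.length_pySetD]

theorem getElem?_foldl_bMark (p : Int) (R : List Int) (hnd : R.Nodup)
    (hpos : ∀ x ∈ R, 1 ≤ x) (l : List Int) (i : Nat) (hi : i < l.length) :
    (R.foldl (bMark p) l)[i]? = some (if (i : Int) ∈ R then l[i] * pPart p i else l[i]) := by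
  induction R generalizing l with
  | nil => simp [List.foldl, hi]
  | cons x R ih =>
    have hx1 : 1 ≤ x := hpos x (by simp)
    have hlen' : (bMark p l x).length = l.length := by
      simp [bMark, PySem.List.length_pySetD]
    have hi' : i < (bMark p l x).length := by omega
    have step := bMark_getElem? p x hx1 l i hi
    have hval : (bMark p l x)[i]'hi' = if (i : Int) = x then l[i] * pPart p i else l[i] := by
      rw [List.getElem?_eq_getElem hi'] at step
      rw [Option.some.inj step]
      rcases eq_or_ne ((i : Int)) x with h | h
      · rw [if_pos h, if_pos h, ← h]
      · rw [if_neg h, if_neg h]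
    have goal := ih hnd.of_cons (fun y hy => hpos y (by simp [hy])) (bMark p l x) (by omega)
    simp only [List.foldl]
    rw [goal, hval]
    rcases eq_or_ne ((i : Int)) x with h | h
    · have hxR : x ∉ R := (List.nodup_cons.1 hnd).1
      have hiR : ((i : Int)) ∉ R := by rw [h]; exact hxR
      rw [if_neg hiR, if_pos h, if_pos (by simp [h] : (i : Int) ∈ x :: R)]
    · rw [if_neg h]
      by_cases hm : (i : Int) ∈ R
      · rw [if_pos hm, if_pos (by simp [hm] : (i : Int) ∈ x :: R)]
      · rw [if_neg hm, if_neg (by simp [h, hm] : ¬ (i : Int) ∈ x :: R)]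

theorem pPart_eq_one (p i : Int) (h : ¬ (p ∣ i ∧ i ≠ 0)) : pPart p i = 1 := by
  rw [pPart, pPartAux]
  rcases eq_or_ne i 0 with h0 | h0
  · rw [dif_neg (fun hc => absurd hc.2.1 (by omega))]
  · rw [dif_neg (fun hc => h ⟨(PySem.Int.mod_eq_zero_iff_dvd i p).1 hc.2.2, h0⟩)]

theorem phase_eq (n p : Int) (l : List Int) (hp : 2 ≤ p) (hlen : l.length ≤ (n + 1).toNat) :
    aWhile n p l p = (PySem.List.pyRange p (n + 1) p).foldl (bMark p) l := by
  apply List.ext_getElem?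
  intro i
  have hlA : (aWhile n p l p).length = l.length := length_aWhile n p l p
  have hlB : ((PySem.List.pyRange p (n + 1) p).foldl (bMark p) l).length = l.length :=
    length_foldl_bMark p _ l
  by_cases hi : i < l.length
  · rw [getElem?_aWhile n p l p hp (by omega) hlen i hi]
    rw [getElem?_foldl_bMark p (PySem.List.pyRange p (n + 1) p)
      (nodup_pyRange_pos p (n + 1) p (by omega))
      (fun x hx => by
        have := (PySem.List.mem_pyRange_iff_of_pos (by omega : (0:Int) < p) x).1 hx
        omega) l i hi]
    rw [roundsMul_eq_pPart p hp i n (i : Int) (by omega) (by omega) (by omega)]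
    simp only [mem_round_iff n p (by omega) i (by omega)]
    by_cases hc : p ∣ (i : Int) ∧ (i : Int) ≠ 0
    · rw [if_pos hc]
    · rw [if_neg hc, pPart_eq_one p i hc, mul_one]
  · rw [List.getElem?_eq_none (by omega), List.getElem?_eq_none (by omega)]

theorem fold_eq (n : Int) (L : List Int) (hL : ∀ x ∈ L, 2 ≤ x) : ∀ (l : List Int),
    l.length ≤ (n + 1).toNat →
    L.foldl (fun l p => if PySem.List.pyGet? l p = some 1 then aWhile n p l p else l) l =
    L.foldl (fun l p => if PySem.List.pyGet? l p = some 1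
      then (PySem.List.pyRange p (n + 1) p).foldl (bMark p) l else l) l := by
  induction L with
  | nil => intro l _; rfl
  | cons x L ihL =>
    intro l hlen
    have hx : 2 ≤ x := hL x (by simp)
    simp only [List.foldl]
    by_cases hc : PySem.List.pyGet? l x = some 1
    · rw [if_pos hc, if_pos hc, phase_eq n x l hx hlen]
      exact ihL (fun y hy => hL y (by simp [hy])) _ (by
        rw [length_foldl_bMark]; exact hlen)
    · rw [if_neg hc, if_neg hc]
      exact ihL (fun y hy => hL y (by simp [hy])) l hlen

-- ===== VERDICT (by name: the statement is the Claim_ definition above) =====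
theorem b_smooth_sieve_spec : Claim_equal_b_smooth_sieve := by
  intro n B _ _
  unfold Spec_b_smooth_sieve b_smooth_sieve b_smooth_sieve_alt
  exact fold_eq n _ (fun x hx => ((PySem.List.mem_pyRange_one).1 hx).1) _ (by simp)
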